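-- pv_equiv track=rewrite | github.com/nuuuwan/map_decoder | src/map_decoder/MapDecoderEntMixin.py | get_ent_to_label_to_n
-- ===== SOURCE A (Python) =====
-- def get_ent_to_label_to_n(info_list):
--     idx = {}
--     for info in info_list:
--         ent_id = info["ent_id"]
--         label = info["label"]
--
--         if ent_id not in idx:
--             idx[ent_id] = {}
--         if label not in idx[ent_id]:
--             idx[ent_id][label] = 0
--
--         idx[ent_id][label] += 1
--
--     return idx
-- ===== SOURCE B (Python) =====
-- def get_ent_to_label_to_n(info_list):
--     ent_to_labels = {}
--     for info in info_list:
--         ent_to_labels.setdefault(info["ent_id"], []).append(info["label"])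
--     return {
--         ent_id: {label: labels.count(label) for label in dict.fromkeys(labels)}
--         for ent_id, labels in ent_to_labels.items()
--     }
-- ===== Notes on version B (the rewrite author's own statement) =====
-- stated objective: alternative
-- what changed: Replaces the single interleaved nested-dict increment loop by a group-then-count decomposition: one pass groups labels per ent_id into lists, then a comprehension counts each group's labels via dict.fromkeys ordered dedup and list.count. Pre_ excludes only inputs where an info dict lacks the 'ent_id' or 'label' key, on which A raises KeyError.
import Mathlib
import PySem

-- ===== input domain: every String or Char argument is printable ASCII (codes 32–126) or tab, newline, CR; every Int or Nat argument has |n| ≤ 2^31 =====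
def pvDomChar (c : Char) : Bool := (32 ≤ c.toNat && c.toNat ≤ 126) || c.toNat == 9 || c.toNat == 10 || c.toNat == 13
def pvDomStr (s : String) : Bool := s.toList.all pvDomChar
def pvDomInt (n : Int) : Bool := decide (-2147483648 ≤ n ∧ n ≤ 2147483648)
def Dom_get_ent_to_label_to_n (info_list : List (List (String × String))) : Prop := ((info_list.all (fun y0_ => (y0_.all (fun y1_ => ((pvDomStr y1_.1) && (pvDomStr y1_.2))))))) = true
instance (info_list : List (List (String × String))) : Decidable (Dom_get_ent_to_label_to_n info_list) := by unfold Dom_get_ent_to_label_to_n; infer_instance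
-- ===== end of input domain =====

-- B replaces A's interleaved nested-dict increment loop by a group-then-count decomposition
-- (group labels per ent_id, then count each group); same cost class, no speed claim.

-- ===== PORT A =====
-- A: one pass; idx[ent_id][label] += 1 with explicit "not in" initialisations.
def get_ent_to_label_to_n (info_list : List (List (String × String))) : List (String × List (String × Int)) :=
  let idx : PySem.Dict String (PySem.Dict String Int) :=
    info_list.foldl (fun idx info =>
      match (PySem.Dict.mk info).get? "ent_id" with
      | none => idx   -- KeyError in Python: excluded by Pre_
      | some ent_id =>
        match (PySem.Dict.mk info).get? "label" with
        | none => idx   -- KeyError in Python: excluded by Pre_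
        | some label =>
          let idx := if idx.contains ent_id then idx else idx.insert ent_id PySem.Dict.empty
          let inner := idx.getD ent_id PySem.Dict.empty
          let inner := if inner.contains label then inner else inner.insert label (0 : Int)
          idx.insert ent_id (inner.insert label (inner.getD label 0 + 1))) PySem.Dict.empty
  idx.items.map (fun p => (p.1, p.2.items))

-- ===== PORT B =====
-- B: pass 1 groups labels per ent_id; pass 2 counts each group (dict.fromkeys dedup + list.count).
def get_ent_to_label_to_n_alt (info_list : List (List (String × String))) : List (String × List (String × Int)) :=
  let ent_to_labels : PySem.Dict String (List String) :=
    info_list.foldl (fun d info =>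
      match (PySem.Dict.mk info).get? "ent_id", (PySem.Dict.mk info).get? "label" with
      | some e, some l =>
        let d := d.setdefault e []          -- ent_to_labels.setdefault(e, [])
        d.insert e (d.getD e [] ++ [l])     -- .append(l)  (in-place: position kept)
      | _, _ => d) PySem.Dict.empty         -- none = KeyError in Python: excluded by Pre_
  ent_to_labels.items.map (fun p =>
    (p.1, (PySem.List.dedup p.2).map (fun l => (l, (p.2.count l : Int)))))

-- ===== PRECONDITION & SPEC =====
-- Pre_: every info dict has both the "ent_id" and the "label" key (otherwise Python A raises KeyError).
def Pre_get_ent_to_label_to_n (info_list : List (List (String × String))) : Prop :=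
  ∀ info ∈ info_list, ((PySem.Dict.mk info).get? "ent_id").isSome ∧ ((PySem.Dict.mk info).get? "label").isSome
instance (info_list : List (List (String × String))) : Decidable (Pre_get_ent_to_label_to_n info_list) := by unfold Pre_get_ent_to_label_to_n; infer_instance

def pvWitness_get_ent_to_label_to_n : (List (List (String × String))) :=
  [[("ent_id", "e1"), ("label", "x")], [("ent_id", "e1"), ("label", "x")], [("ent_id", "e2"), ("label", "y")]]

def Spec_get_ent_to_label_to_n (info_list : List (List (String × String))) (out : List (String × List (String × Int))) : Prop := out = get_ent_to_label_to_n_alt info_list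
instance (info_list : List (List (String × String))) (out : List (String × List (String × Int))) : Decidable (Spec_get_ent_to_label_to_n info_list out) := by unfold Spec_get_ent_to_label_to_n; infer_instance

-- ===== CLAIM (what is proved, stated in full; the proofs are below) =====
def Claim_equal_get_ent_to_label_to_n : Prop := ∀ (info_list : List (List (String × String))), Dom_get_ent_to_label_to_n info_list → Pre_get_ent_to_label_to_n info_list → Spec_get_ent_to_label_to_n info_list (get_ent_to_label_to_n info_list)

-- ===== LEMMAS AND PROOFS =====

-- turn a grouping dict into A's dict of counters
def toC (g : PySem.Dict String (List String)) : PySem.Dict String (PySem.Dict String Int) :=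
  PySem.Dict.mk (g.items.map (fun p => (p.1, PySem.Dict.counter p.2)))

theorem get?_map_snd {α β : Type} (l : List (String × α)) (f : α → β) (e : String) :
    (PySem.Dict.mk (l.map (fun p => (p.1, f p.2)))).get? e = ((PySem.Dict.mk l).get? e).map f := by
  induction l with
  | nil => simp [PySem.Dict.get?]
  | cons p rest ih =>
    obtain ⟨k, v⟩ := p
    simp only [List.map_cons, PySem.Dict.get?_mk_cons]
    by_cases h : (k == e) = true <;> simp [h, ih]

theorem contains_toC (g : PySem.Dict String (List String)) (e : String) :
    (toC g).contains e = g.contains e := by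
  rw [PySem.Dict.contains_eq_isSome_get?, PySem.Dict.contains_eq_isSome_get?]
  cases g with | mk items => simp [toC, get?_map_snd]

theorem getD_toC (g : PySem.Dict String (List String)) (e : String) :
    (toC g).getD e PySem.Dict.empty = PySem.Dict.counter (g.getD e []) := by
  cases g with | mk items =>
  simp only [toC, PySem.Dict.getD, get?_map_snd]
  cases (PySem.Dict.mk items).get? e <;> simp [PySem.Dict.counter]

-- the 'setdefault then overwrite' shape both loop bodies use, normalised to one insert
theorem step_norm {ν : Type} (d : PySem.Dict String ν) (k : String) (v0 : ν) (F : ν → ν) :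
    ((if d.contains k then d else d.insert k v0).insert k
      (F ((if d.contains k then d else d.insert k v0).getD k v0))) = d.insert k (F (d.getD k v0)) := by
  by_cases h : d.contains k = true
  · simp [h]
  · simp only [h, Bool.false_eq_true, if_false]
    rw [PySem.Dict.insert_insert_self, PySem.Dict.getD_insert_self,
      PySem.Dict.getD_of_not_contains d v0 (by simp [h])]

theorem setdefault_norm {ν : Type} (d : PySem.Dict String ν) (k : String) (v0 : ν) (F : ν → ν) :
    ((d.setdefault k v0).insert k (F ((d.setdefault k v0).getD k v0))) = d.insert k (F (d.getD k v0)) := by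
  by_cases h : d.contains k = true
  · rw [PySem.Dict.setdefault_of_contains d v0 h]
  · rw [PySem.Dict.setdefault_of_not_contains d v0 (by simp [h]), PySem.Dict.insert_insert_self,
      PySem.Dict.getD_insert_self, PySem.Dict.getD_of_not_contains d v0 (by simp [h])]

theorem toC_step (g : PySem.Dict String (List String)) (e l : String) :
    (toC g).insert e (((toC g).getD e PySem.Dict.empty).insert l
        (((toC g).getD e PySem.Dict.empty).getD l 0 + 1))
      = toC (g.insert e (g.getD e [] ++ [l])) := by
  have hc : ((toC g).getD e PySem.Dict.empty).insert l (((toC g).getD e PySem.Dict.empty).getD l 0 + 1)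
      = PySem.Dict.counter (g.getD e [] ++ [l]) := by
    rw [getD_toC, PySem.Dict.counter_append_singleton]; rfl
  rw [hc]
  cases g with | mk items =>
  by_cases h : (PySem.Dict.mk items).contains e = true
  · apply PySem.Dict.ext
    rw [PySem.Dict.items_insert_of_contains _ _ (by rw [contains_toC]; exact h),
        toC, toC, PySem.Dict.items_insert_of_contains _ _ h]
    simp only [List.map_map]
    apply List.map_congr_left
    intro p _
    by_cases hp : (p.1 == e) = true <;> simp [hp, Function.comp]
  · apply PySem.Dict.ext
    rw [PySem.Dict.items_insert_of_not_contains _ _ (by rw [contains_toC]; simp [h]),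
        toC, toC, PySem.Dict.items_insert_of_not_contains _ _ (by simp [h])]
    simp

theorem fold_eq (L : List (List (String × String))) (g : PySem.Dict String (List String)) :
    L.foldl (fun idx info =>
      match (PySem.Dict.mk info).get? "ent_id" with
      | none => idx
      | some ent_id =>
        match (PySem.Dict.mk info).get? "label" with
        | none => idx
        | some label =>
          let idx := if idx.contains ent_id then idx else idx.insert ent_id PySem.Dict.empty
          let inner := idx.getD ent_id PySem.Dict.empty
          let inner := if inner.contains label then inner else inner.insert label (0 : Int)
          idx.insert ent_id (inner.insert label (inner.getD label 0 + 1))) (toC g)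
    = toC (L.foldl (fun d info =>
      match (PySem.Dict.mk info).get? "ent_id", (PySem.Dict.mk info).get? "label" with
      | some e, some l =>
        let d := d.setdefault e []
        d.insert e (d.getD e [] ++ [l])
      | _, _ => d) g) := by
  induction L generalizing g with
  | nil => rfl
  | cons info rest ih =>
    simp only [List.foldl_cons]
    cases he : (PySem.Dict.mk info).get? "ent_id" with
    | none => exact ih g
    | some e =>
      cases hl : (PySem.Dict.mk info).get? "label" with
      | none => exact ih g
      | some l =>
        simp only []
        have hstepA : (let idx := if (toC g).contains e then toC g else (toC g).insert e PySem.Dict.empty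
            let inner := idx.getD e PySem.Dict.empty
            let inner := if inner.contains l then inner else inner.insert l (0 : Int)
            idx.insert e (inner.insert l (inner.getD l 0 + 1)))
            = toC (g.insert e (g.getD e [] ++ [l])) := by
          simp only []
          rw [step_norm (toC g) e PySem.Dict.empty
              (fun inner => (if inner.contains l then inner else inner.insert l (0:Int)).insert l
                ((if inner.contains l then inner else inner.insert l (0:Int)).getD l 0 + 1))]
          rw [step_norm ((toC g).getD e PySem.Dict.empty) l 0 (fun x => x + 1)]
          exact toC_step g e l
        have hstepB : (let d := g.setdefault e []
            d.insert e (d.getD e [] ++ [l])) = g.insert e (g.getD e [] ++ [l]) :=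
          setdefault_norm g e [] (fun v => v ++ [l])
        rw [hstepA, ← hstepB]
        exact ih _
  
-- ===== VERDICT (by name: the statement is the Claim_ definition above) =====
theorem get_ent_to_label_to_n_spec : Claim_equal_get_ent_to_label_to_n := by
  intro info_list _ _
  unfold Spec_get_ent_to_label_to_n get_ent_to_label_to_n get_ent_to_label_to_n_alt
  rw [show (PySem.Dict.empty : PySem.Dict String (PySem.Dict String Int)) = toC PySem.Dict.empty from rfl,
    fold_eq]
  simp only [toC, List.map_map]
  apply List.map_congr_left
  intro p _
  simp [Function.comp, PySem.Dict.items_counter, PySem.List.dedup_eq_ofList]
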